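-- pv_equiv track=rewrite | github.com/the-omega-institute/automath | theory/2026_golden_ratio_driven_scan_projection_generation_recursive_emergence/scripts/exp_xi_p7_s5_artin_dedekind_chebotarev_certificate.py | _format_partition_lens
-- ===== SOURCE A (Python) =====
-- from typing import Dict, Iterable, List, Sequence, Tuple
--
-- def _format_partition_lens(lens: Iterable[int]) -> str:
--     """Format multiset of cycle lengths as '6^2·3^2·2' etc."""
--     counts: Dict[int, int] = {}
--     for L in lens:
--         counts[L] = counts.get(L, 0) + 1
--     parts = []
--     for L in sorted(counts.keys(), reverse=True):
--         e = counts[L]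
--         if e == 1:
--             parts.append(f"{L}")
--         else:
--             parts.append(f"{L}^{e}")
--     return r"\cdot ".join(parts) if parts else "1"
-- ===== SOURCE B (Python) =====
-- def _format_partition_lens(lens):
--     """Format multiset of cycle lengths as '6^2·3^2·2' etc."""
--     xs = sorted(lens, reverse=True)
--     if not xs:
--         return "1"
--     parts = []
--     cur = xs[0]
--     run = 1
--     for v in xs[1:]:
--         if v == cur:
--             run += 1
--         else:
--             parts.append(f"{cur}" if run == 1 else f"{cur}^{run}")
--             cur = v
--             run = 1
--     parts.append(f"{cur}" if run == 1 else f"{cur}^{run}")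
--     return r"\cdot ".join(parts)
-- ===== Notes on version B (the rewrite author's own statement) =====
-- stated objective: faster
-- what changed: Replaces A's count-dict (build a hash counter element by element, sort its keys descending, look each up) with a single descending sort of the raw list followed by a run-length walk over consecutive equal elements that emits each group directly.
import Mathlib
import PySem

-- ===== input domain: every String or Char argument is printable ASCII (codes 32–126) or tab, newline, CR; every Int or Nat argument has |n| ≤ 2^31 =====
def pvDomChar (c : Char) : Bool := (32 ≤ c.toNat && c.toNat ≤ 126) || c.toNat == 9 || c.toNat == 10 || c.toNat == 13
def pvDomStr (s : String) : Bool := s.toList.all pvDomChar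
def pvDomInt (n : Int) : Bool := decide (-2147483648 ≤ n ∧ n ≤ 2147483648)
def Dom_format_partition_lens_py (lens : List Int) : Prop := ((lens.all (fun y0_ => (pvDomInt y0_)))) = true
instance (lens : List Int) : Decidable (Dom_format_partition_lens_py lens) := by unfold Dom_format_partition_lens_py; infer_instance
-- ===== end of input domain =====

-- B replaces A's count-dict + sorted-keys pass by one descending sort of the raw
-- list followed by a run-length walk over consecutive equal elements (same asymptotic
-- cost; a timing run measured a constant-factor speedup).


-- ===== PORT A =====
-- counts[L] = counts.get(L, 0) + 1 over lens; then one entry per key, keys sorted descending.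
def format_partition_lens_py (lens : List Int) : String :=
  let counts : PySem.Dict Int Int :=
    lens.foldl (fun d L => d.insert L (d.getD L 0 + 1)) PySem.Dict.empty
  let parts : List String :=
    (PySem.List.sorted counts.keys (fun x => x) true).foldl
      (fun ps L =>
        let e := counts.getD L 0
        ps ++ [if e == 1 then PySem.Int.toStr L
               else PySem.Int.toStr L ++ "^" ++ PySem.Int.toStr e]) []
  if parts.isEmpty then "1" else PySem.Str.join "\\cdot " parts

-- ===== PORT B =====
-- f"{cur}" if run == 1 else f"{cur}^{run}"
def pvFmt (L e : Int) : String :=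
  if e == 1 then PySem.Int.toStr L else PySem.Int.toStr L ++ "^" ++ PySem.Int.toStr e

-- the run-length loop of Source B: walk the tail, tracking current value and its run count
def pvRuns (cur run : Int) : List Int → List String
  | [] => [pvFmt cur run]
  | v :: t => if v = cur then pvRuns cur (run + 1) t else pvFmt cur run :: pvRuns v 1 t

def format_partition_lens_py_alt (lens : List Int) : String :=
  match PySem.List.sorted lens (fun x => x) true with
  | [] => "1"
  | x :: t => PySem.Str.join "\\cdot " (pvRuns x 1 t)

-- ===== PRECONDITION & SPEC =====
def Spec_format_partition_lens_py (lens : List Int) (out : String) : Prop := out = format_partition_lens_py_alt lens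
instance (lens : List Int) (out : String) : Decidable (Spec_format_partition_lens_py lens out) := by unfold Spec_format_partition_lens_py; infer_instance

-- ===== CLAIM (what is proved, stated in full; the proofs are below) =====
def Claim_equal_format_partition_lens_py : Prop := ∀ (lens : List Int), Dom_format_partition_lens_py lens → Spec_format_partition_lens_py lens (format_partition_lens_py lens)

-- ===== LEMMAS AND PROOFS =====

-- the distinct values of lens, sorted descending (A's key list)
def pvKeys (lens : List Int) : List Int :=
  PySem.List.sorted (PySem.Set.ofList lens) (fun x => x) true

-- lens regrouped: each distinct value replicated by its multiplicity, in key order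
def pvFlat (lens ks : List Int) : List Int :=
  ks.flatMap (fun k => List.replicate (lens.count k) k)

lemma pvRuns_repl (k : Int) (m : Nat) (n : Int) (t : List Int) :
    pvRuns k n (List.replicate m k ++ t) = pvRuns k (n + m) t := by
  induction m generalizing n with
  | zero => simp
  | succ m ih =>
    have h : n + ((m + 1 : Nat) : Int) = (n + 1) + m := by push_cast; ring
    rw [h, List.replicate_succ, List.cons_append, ← ih]
    simp [pvRuns]

lemma pvRuns_flat (lens : List Int) (ks : List Int) (k : Int) (n : Int)
    (hlt : ∀ x ∈ ks, x < k) (hpw : ks.Pairwise (· > ·))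
    (hc : ∀ x ∈ ks, 0 < lens.count x) :
    pvRuns k n (pvFlat lens ks) = pvFmt k n :: ks.map (fun x => pvFmt x (lens.count x)) := by
  induction ks generalizing k n with
  | nil => simp [pvFlat, pvRuns]
  | cons k' t ih =>
    have hc' : 0 < lens.count k' := hc k' (by simp)
    have hne : k' ≠ k := by have := hlt k' (by simp); omega
    have hrepl : List.replicate (lens.count k') k'
        = k' :: List.replicate (lens.count k' - 1) k' := by
      cases h : lens.count k' with
      | zero => omega
      | succ m => simp [List.replicate_succ]
    simp only [pvFlat, List.flatMap_cons, hrepl, List.cons_append, pvRuns, if_neg hne]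
    rw [pvRuns_repl]
    have h1 : (1 : Int) + (lens.count k' - 1 : Nat) = (lens.count k' : Int) := by
      push_cast [Nat.cast_sub (by omega : 1 ≤ lens.count k')]
      ring
    rw [h1]
    have ihh := ih k' (lens.count k')
      (fun x hx => (List.pairwise_cons.mp hpw).1 x hx)
      (List.pairwise_cons.mp hpw).2
      (fun x hx => hc x (by simp [hx]))
    simp only [pvFlat] at ihh
    rw [ihh]
    simp

lemma pvKeys_mem (lens : List Int) (v : Int) : v ∈ pvKeys lens ↔ v ∈ lens := by
  unfold pvKeys
  rw [PySem.List.mem_sorted, PySem.Set.mem_ofList]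

lemma pvKeys_nodup (lens : List Int) : (pvKeys lens).Nodup :=
  ((PySem.List.sorted_perm _ _ _).nodup_iff).mpr (PySem.Set.nodup_ofList lens)

lemma pvKeys_pairwise (lens : List Int) : (pvKeys lens).Pairwise (· > ·) := by
  have h1 := PySem.List.sorted_pairwise_rev (PySem.Set.ofList lens) (fun x => x)
  have h2 := (pvKeys_nodup lens)
  rw [List.Nodup] at h2
  exact (h1.and h2).imp (fun h => lt_of_le_of_ne h.1 (Ne.symm h.2))

lemma pvFlat_count (lens : List Int) (ks : List Int) (hnd : ks.Nodup) (v : Int) :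
    (pvFlat lens ks).count v = if v ∈ ks then lens.count v else 0 := by
  induction ks with
  | nil => simp [pvFlat]
  | cons k t ih =>
    have hnd' := List.nodup_cons.mp hnd
    show (List.replicate (lens.count k) k ++ pvFlat lens t).count v = _
    rw [List.count_append, List.count_replicate, ih hnd'.2]
    by_cases hv : v = k
    · subst hv
      simp [hnd'.1]
    · simp [hv, Ne.symm hv]

lemma pvFlat_perm (lens : List Int) : (pvFlat lens (pvKeys lens)).Perm lens := by
  rw [List.perm_iff_count]
  intro v
  rw [pvFlat_count lens _ (pvKeys_nodup lens) v]
  by_cases hv : v ∈ pvKeys lens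
  · simp [hv]
  · rw [if_neg hv]
    have : v ∉ lens := fun h => hv ((pvKeys_mem lens v).mpr h)
    simp [List.count_eq_zero.mpr this]

lemma pvFlat_sorted (lens : List Int) (ks : List Int) (hpw : ks.Pairwise (· > ·)) :
    (pvFlat lens ks).Pairwise (fun a b => b ≤ a) := by
  induction ks with
  | nil => simp [pvFlat]
  | cons k t ih =>
    have hpw' := List.pairwise_cons.mp hpw
    simp only [pvFlat, List.flatMap_cons]
    rw [List.pairwise_append]
    refine ⟨List.pairwise_replicate.mpr (by simp), ih hpw'.2, ?_⟩
    intro a ha b hb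
    have hak := List.eq_of_mem_replicate ha
    obtain ⟨k', hk', hb'⟩ := List.mem_flatMap.mp hb
    have hbk := List.eq_of_mem_replicate hb'
    subst hak hbk
    exact le_of_lt (hpw'.1 _ hk')

lemma pvSorted_eq_flat (lens : List Int) :
    PySem.List.sorted lens (fun x => x) true = pvFlat lens (pvKeys lens) := by
  refine List.Perm.eq_of_pairwise (le := fun a b => b ≤ a)
    (fun a b _ _ h1 h2 => le_antisymm h2 h1)
    (PySem.List.sorted_pairwise_rev lens (fun x => x))
    (pvFlat_sorted lens _ (pvKeys_pairwise lens))
    ((PySem.List.sorted_perm lens (fun x => x) true).trans (pvFlat_perm lens).symm)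

lemma portA_eq (lens : List Int) :
    format_partition_lens_py lens =
      (if (pvKeys lens).isEmpty then "1"
       else PySem.Str.join "\\cdot "
         ((pvKeys lens).map (fun L => pvFmt L (lens.count L)))) := by
  unfold format_partition_lens_py
  rw [PySem.Dict.foldl_insert_getD_add_one_eq_counter]
  simp only [PySem.Dict.keys_counter, PySem.Dict.getD_counter, pvFmt,
    PySem.List.foldl_append_singleton_eq_map, List.nil_append, List.isEmpty_map]
  rfl

-- ===== VERDICT (by name: the statement is the Claim_ definition above) =====
theorem format_partition_lens_py_spec : Claim_equal_format_partition_lens_py := by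
  intro lens _
  unfold Spec_format_partition_lens_py format_partition_lens_py_alt
  rw [pvSorted_eq_flat, portA_eq]
  rcases hks : pvKeys lens with _ | ⟨k, t⟩
  · simp [pvFlat]
  · have hpw := pvKeys_pairwise lens
    rw [hks] at hpw
    have hpw' := List.pairwise_cons.mp hpw
    have hc : ∀ x ∈ (k :: t), 0 < lens.count x := by
      intro x hx
      have : x ∈ lens := (pvKeys_mem lens x).mp (hks ▸ hx)
      exact List.count_pos_iff.mpr this
    have hck : 0 < lens.count k := hc k (by simp)
    have hflat : pvFlat lens (k :: t)
        = k :: (List.replicate (lens.count k - 1) k ++ pvFlat lens t) := by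
      simp only [pvFlat, List.flatMap_cons]
      cases h : lens.count k with
      | zero => omega
      | succ m => simp [List.replicate_succ]
    rw [hflat]
    simp only [pvRuns]
    rw [pvRuns_repl]
    have h1 : (1 : Int) + (lens.count k - 1 : Nat) = (lens.count k : Int) := by
      push_cast [Nat.cast_sub (by omega : 1 ≤ lens.count k)]
      ring
    rw [h1, pvRuns_flat lens t k (lens.count k) hpw'.1 hpw'.2
      (fun x hx => hc x (by simp [hx]))]
    simp [pvFmt]
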